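-- pv_equiv track=rewrite | github.com/s-koide-dc/Design2Code | src/utils/spec_auditor.py | _tokenize_identifiers
-- ===== SOURCE A (Python) =====
-- from typing import Dict, Any, List, Set
--
-- def _tokenize_identifiers(text: str) -> List[str]:
--     tokens: List[str] = []
--     current: List[str] = []
--     for ch in str(text):
--         if ch.isalnum() or ch == "_":
--             current.append(ch)
--         else:
--             if current:
--                 tokens.append("".join(current))
--                 current = []
--     if current:
--         tokens.append("".join(current))
--     return tokens
-- ===== SOURCE B (Python) =====
-- def _tokenize_identifiers(text):
--     normalized = "".join(ch if (ch.isalnum() or ch == "_") else " " for ch in str(text))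
--     return normalized.split()
-- ===== Notes on version B (the rewrite author's own statement) =====
-- stated objective: simpler
-- what changed: Replaced the explicit run-accumulation buffer and flush logic with a normalize-then-split strategy: non-token characters are mapped to spaces and the result is str.split().
import Mathlib
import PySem

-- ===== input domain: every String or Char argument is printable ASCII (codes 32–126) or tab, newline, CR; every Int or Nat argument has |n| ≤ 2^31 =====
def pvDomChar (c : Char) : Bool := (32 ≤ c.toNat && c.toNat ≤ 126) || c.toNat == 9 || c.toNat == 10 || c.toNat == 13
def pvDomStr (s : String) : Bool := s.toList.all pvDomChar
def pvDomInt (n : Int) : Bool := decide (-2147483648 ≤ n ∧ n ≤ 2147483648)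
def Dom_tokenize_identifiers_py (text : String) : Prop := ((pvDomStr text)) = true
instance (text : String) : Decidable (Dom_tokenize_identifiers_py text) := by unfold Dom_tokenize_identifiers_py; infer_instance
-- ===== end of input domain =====

-- B replaces A's run-accumulation buffer with normalize-delimiters-then-split (same O(n), simpler structure).


-- ===== PORT A =====
-- loop state: (tokens so far, current run buffer); exact on the ASCII domain (Chars.isalnum is ASCII-exact there)
def pvStepA (st : List String × List Char) (ch : Char) : List String × List Char :=
  if PySem.Chars.isalnum ch || ch == '_' then (st.1, st.2 ++ [ch])
  else if st.2.isEmpty then st else (st.1 ++ [String.ofList st.2], [])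

def tokenize_identifiers_py (text : String) : List String :=
  let st := text.toList.foldl pvStepA ([], [])
  if st.2.isEmpty then st.1 else st.1 ++ [String.ofList st.2]

-- ===== PORT B =====
def tokenize_identifiers_py_alt (text : String) : List String :=
  PySem.Str.split₀
    (String.ofList (text.toList.map (fun ch =>
      if PySem.Chars.isalnum ch || ch == '_' then ch else ' ')))

-- ===== PRECONDITION & SPEC =====
def Spec_tokenize_identifiers_py (text : String) (out : List String) : Prop := out = tokenize_identifiers_py_alt text
instance (text : String) (out : List String) : Decidable (Spec_tokenize_identifiers_py text out) := by unfold Spec_tokenize_identifiers_py; infer_instance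

-- ===== CLAIM (what is proved, stated in full; the proofs are below) =====
def Claim_equal_tokenize_identifiers_py : Prop := ∀ (text : String), Dom_tokenize_identifiers_py text → Spec_tokenize_identifiers_py text (tokenize_identifiers_py text)

-- ===== LEMMAS AND PROOFS =====

-- a token character (alnum or underscore) is never whitespace
theorem pv_tok_not_space (c : Char) (h : (PySem.Chars.isalnum c || c == '_') = true) :
    PySem.Chars.isspace c = false := by
  simp only [PySem.Chars.isalnum, PySem.Chars.isalpha, PySem.Chars.isupper, PySem.Chars.islower,
    PySem.Chars.isdigit, PySem.Chars.isspace, Bool.or_eq_true, Bool.and_eq_true, decide_eq_true_eq,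
    beq_iff_eq] at h ⊢
  have h' : (65 ≤ c.toNat ∧ c.toNat ≤ 90) ∨ (97 ≤ c.toNat ∧ c.toNat ≤ 122) ∨
      (48 ≤ c.toNat ∧ c.toNat ≤ 57) ∨ c.toNat = 95 := by
    rcases h with ((⟨h1, h2⟩ | ⟨h1, h2⟩) | ⟨h1, h2⟩) | h1
    · exact Or.inl ⟨h1, h2⟩
    · exact Or.inr (Or.inl ⟨h1, h2⟩)
    · exact Or.inr (Or.inr (Or.inl ⟨h1, h2⟩))
    · subst h1; exact Or.inr (Or.inr (Or.inr rfl))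
  simp only [Bool.or_eq_false_iff, Bool.and_eq_false_iff, decide_eq_false_iff_not]
  omega

-- split₀.go with a nonempty accumulator = accumulator (reversed) ++ go with an empty one
theorem pv_go_acc (cs : List Char) (cur : List Char) (acc : List (List Char)) :
    PySem.Chars.split₀.go cs cur acc = acc.reverse ++ PySem.Chars.split₀.go cs cur [] := by
  induction cs generalizing cur acc with
  | nil =>
    simp only [PySem.Chars.split₀.go]
    by_cases h : cur.isEmpty <;> simp [h]
  | cons c rest ih =>
    simp only [PySem.Chars.split₀.go]
    by_cases hs : PySem.Chars.isspace c
    · by_cases hc : cur.isEmpty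
      · simp only [hs, hc, if_true]
        exact ih [] acc
      · simp only [hs, hc, if_true]
        rw [ih [] (cur.reverse :: acc), ih [] [cur.reverse]]
        simp
    · simp only [hs]
      exact ih (c :: cur) acc

-- main invariant: A's fold (with finish) = tokens ++ split₀ run of B's mapped tail, current buffer carried over
theorem pv_main (cs : List Char) (tokens : List String) (cur : List Char) :
    (let st := cs.foldl pvStepA (tokens, cur);
     if st.2.isEmpty then st.1 else st.1 ++ [String.ofList st.2]) =
    tokens ++ (PySem.Chars.split₀.go
      (cs.map (fun ch => if PySem.Chars.isalnum ch || ch == '_' then ch else ' '))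
      cur.reverse []).map String.ofList := by
  induction cs generalizing tokens cur with
  | nil =>
    simp only [List.foldl_nil, List.map_nil, PySem.Chars.split₀.go]
    by_cases h : cur.isEmpty
    · simp [List.isEmpty_iff.mp h]
    · have : cur.reverse.isEmpty = false := by
        simp only [List.isEmpty_eq_false_iff] at h ⊢; simpa using h
      simp [h, this]
  | cons c rest ih =>
    simp only [List.foldl_cons, List.map_cons]
    by_cases ht : (PySem.Chars.isalnum c || c == '_') = true
    · have hns := pv_tok_not_space c ht
      simp only [ht, if_true, PySem.Chars.split₀.go, hns, Bool.false_eq_true, if_false,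
        pvStepA]
      rw [ih tokens (cur ++ [c])]
      simp
    · have hsp : PySem.Chars.isspace ' ' = true := by decide
      simp only [pvStepA, ht, Bool.false_eq_true, if_false,
        PySem.Chars.split₀.go, hsp, if_true]
      by_cases hc : cur.isEmpty
      · have hc' : cur = [] := List.isEmpty_iff.mp hc
        simp only [hc', List.reverse_nil, List.isEmpty_nil, if_true]
        exact ih tokens []
      · have hrc : cur.reverse.isEmpty = false := by
          simp only [List.isEmpty_eq_false_iff] at hc ⊢; simpa using hc
        simp only [hc, hrc, Bool.false_eq_true, if_false, List.reverse_reverse]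
        rw [ih (tokens ++ [String.ofList cur]) [], pv_go_acc _ [] [cur]]
        simp

-- ===== VERDICT (by name: the statement is the Claim_ definition above) =====
theorem tokenize_identifiers_py_spec : Claim_equal_tokenize_identifiers_py := by
  intro text _
  show tokenize_identifiers_py text = tokenize_identifiers_py_alt text
  unfold tokenize_identifiers_py tokenize_identifiers_py_alt PySem.Str.split₀
  have := pv_main text.toList [] []
  simp only [List.reverse_nil] at this
  rw [this]
  simp [PySem.Chars.split₀]
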